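-- pv_equiv track=rewrite | github.com/bublik911/cyborgs_MFC_bot | misc/utils.py | phone_parse
-- ===== SOURCE A (Python) =====
-- def phone_parse(x) -> str:
--     s = str(x)
--     phone = ''
--     for i in s:
--         if i.isdigit():
--             phone += i
--     phone = phone[-10:]
--     return phone
-- ===== SOURCE B (Python) =====
-- def phone_parse(x) -> str:
--     buf = []
--     for c in reversed(str(x)):
--         if c.isdigit():
--             buf.append(c)
--             if len(buf) == 10:
--                 break
--     return ''.join(reversed(buf))
-- ===== Notes on version B (the rewrite author's own statement) =====
-- stated objective: alternative
-- what changed: B scans the string back-to-front collecting at most 10 digits and stopping early, then reverses the buffer, instead of A's full forward digit filter followed by a trailing [-10:] slice.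
import Mathlib
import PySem

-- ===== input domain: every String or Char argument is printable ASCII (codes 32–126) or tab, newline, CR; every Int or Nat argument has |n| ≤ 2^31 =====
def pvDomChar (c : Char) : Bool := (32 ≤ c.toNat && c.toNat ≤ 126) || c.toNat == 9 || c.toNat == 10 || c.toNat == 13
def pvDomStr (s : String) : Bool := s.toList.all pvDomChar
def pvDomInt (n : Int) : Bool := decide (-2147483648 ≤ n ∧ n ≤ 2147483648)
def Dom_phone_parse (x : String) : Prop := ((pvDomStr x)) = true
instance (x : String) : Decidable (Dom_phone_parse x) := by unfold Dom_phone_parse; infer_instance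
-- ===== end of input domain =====

-- B replaces A's full forward digit filter + trailing [-10:] slice by a back-to-front scan
-- that stops after 10 digits and then reverses its buffer (alternative decomposition, not faster asymptotically).

-- ===== PORT A =====
-- strings handled as their code-point lists (PySem.Chars); phone += i is list append
def phone_parse (x : String) : String :=
  let s := x.toList
  let phone : List Char := s.foldl (fun acc i => if PySem.Chars.isdigit i then acc ++ [i] else acc) []
  String.ofList (PySem.List.slice phone (some (-10)) none)

-- ===== PORT B =====
-- the loop of Source B: walk the reversed list, append digits to buf, break at length 10
def pvAltGo : List Char → List Char → List Char
  | buf, [] => buf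
  | buf, c :: t =>
    if PySem.Chars.isdigit c then
      let buf' := buf ++ [c]
      if buf'.length = 10 then buf' else pvAltGo buf' t
    else pvAltGo buf t

def phone_parse_alt (x : String) : String :=
  String.ofList (pvAltGo [] x.toList.reverse).reverse

-- ===== PRECONDITION & SPEC =====
def Spec_phone_parse (x : String) (out : String) : Prop := out = phone_parse_alt x
instance (x : String) (out : String) : Decidable (Spec_phone_parse x out) := by unfold Spec_phone_parse; infer_instance

-- ===== CLAIM (what is proved, stated in full; the proofs are below) =====
def Claim_equal_phone_parse : Prop := ∀ (x : String), Dom_phone_parse x → Spec_phone_parse x (phone_parse x)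

-- ===== LEMMAS AND PROOFS =====
theorem pvAltGo_eq (l buf : List Char) (h : buf.length < 10) :
    pvAltGo buf l = buf ++ ((l.filter PySem.Chars.isdigit).take (10 - buf.length)) := by
  induction l generalizing buf with
  | nil => simp [pvAltGo]
  | cons c t ih =>
    simp only [pvAltGo, List.filter_cons]
    by_cases hd : PySem.Chars.isdigit c
    · simp only [hd, if_pos, List.length_append, List.length_singleton]
      by_cases h10 : buf.length + 1 = 10
      · have : 10 - buf.length = 1 := by omega
        simp [h10, this]
      · have hlt : (buf ++ [c]).length < 10 := by simp; omega
        rw [if_neg (by simpa using h10), ih _ hlt]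
        have : 10 - buf.length = (10 - (buf ++ [c]).length) + 1 := by simp; omega
        simp [this, List.take_succ_cons]
    · simp [hd, ih _ h]

theorem phone_parse_spec : Claim_equal_phone_parse := by
  intro x _
  unfold Spec_phone_parse phone_parse phone_parse_alt
  dsimp only
  rw [PySem.List.foldl_append_if_eq_filter]
  rw [pvAltGo_eq _ _ (by simp)]
  rw [PySem.List.slice_from_neg_ofNat _ 10 (by omega)]
  simp only [List.nil_append, List.length_nil, Nat.sub_zero]
  congr 1
  rw [List.filter_reverse, List.take_reverse, List.reverse_reverse]
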